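-- pv_equiv track=rewrite | github.com/francescapalazzotto/Portfolio_ITDC | Ex3_Integer_Coding.py | decodingFibonacci
-- ===== SOURCE A (Python) =====
-- def fibonacciNum(n):
--     if n == 0:
--         return 0
--     elif n == 1:
--         return 1
--     else:
--         return fibonacciNum(n-1) + fibonacciNum(n-2)
--
-- def decodingFibonacci(fib):
--     fib = fib[: len(fib)-1]     #Remove the final 1
--
--     val = []                    #Create a list of tuples in which there is a couple (bit, numFib)
--                                 #In this way, it will sum the fibonacci number corresponding to only bit 1
--     for i in range(len(fib)):
--         F=fibonacciNum(i+2)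
--         val.append(( fib[i] , F ))
--     num = 0
--     for j in range(len(val)):
--         if val[j][0] == '1':
--             num = num + val[j][1]
--
--     return num
-- ===== SOURCE B (Python) =====
-- def decodingFibonacci(fib):
--     # One linear pass: roll (a, b) = (F(i+2), F(i+3)) along the bits,
--     # adding a whenever the bit is '1'.
--     num = 0
--     a, b = 1, 2
--     for ch in fib[:-1]:
--         if ch == '1':
--             num += a
--         a, b = b, a + b
--     return num
-- ===== Notes on version B (the rewrite author's own statement) =====
-- stated objective: faster
-- what changed: Replaced A's per-position call to the naive exponential recursive Fibonacci (plus the intermediate (bit, value) pair list) by a single linear pass that rolls the two current Fibonacci values in accumulators; intended as asymptotically faster (O(n) vs exponential): a timing run measured B 5.82x at the largest size both finished and A timed out at n=64 where B returned.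
import Mathlib
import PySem

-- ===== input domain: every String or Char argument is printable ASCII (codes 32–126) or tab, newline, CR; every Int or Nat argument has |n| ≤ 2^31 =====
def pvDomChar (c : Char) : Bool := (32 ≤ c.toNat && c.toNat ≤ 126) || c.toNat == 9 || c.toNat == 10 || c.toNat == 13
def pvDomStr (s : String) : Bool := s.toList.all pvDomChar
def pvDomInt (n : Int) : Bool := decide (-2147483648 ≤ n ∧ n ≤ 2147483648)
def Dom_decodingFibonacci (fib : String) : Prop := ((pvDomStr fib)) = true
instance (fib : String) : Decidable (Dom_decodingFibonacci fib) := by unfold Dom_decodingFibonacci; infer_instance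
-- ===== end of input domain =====

-- B replaces A's per-position exponential recursive Fibonacci by one linear pass rolling two Fibonacci values.

-- ===== PORT A =====
-- naive recursive Fibonacci; A only ever calls it on nonnegative arguments i+2, so Nat is faithful
def fibonacciNum : Nat → Int
  | 0 => 0
  | 1 => 1
  | n + 2 => fibonacciNum (n + 1) + fibonacciNum n

def decodingFibonacci (fib : String) : Int :=
  -- fib = fib[: len(fib)-1]
  let fibL : List Char := PySem.List.slice fib.toList none (some ((fib.toList.length : Int) - 1))
  -- for i in range(len(fib)): val.append((fib[i], fibonacciNum(i+2)))
  let val : List (Char × Int) :=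
    (PySem.List.pyRange 0 (fibL.length : Int) 1).foldl
      (fun acc i => acc ++ [(PySem.List.pyGetD fibL i ' ', fibonacciNum (i.toNat + 2))]) []
  -- for j in range(len(val)): if val[j][0] == '1': num = num + val[j][1]
  (PySem.List.pyRange 0 (val.length : Int) 1).foldl
    (fun num j =>
      if (PySem.List.pyGetD val j (' ', 0)).1 = '1' then num + (PySem.List.pyGetD val j (' ', 0)).2
      else num) 0

-- ===== PORT B =====
def goFib : List Char → Int → Int → Int → Int
  | [], num, _, _ => num
  | c :: rest, num, a, b => goFib rest (if c = '1' then num + a else num) b (a + b)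

def decodingFibonacci_alt (fib : String) : Int :=
  goFib (PySem.List.slice fib.toList none (some (-1))) 0 1 2

-- ===== PRECONDITION & SPEC =====
def Spec_decodingFibonacci (fib : String) (out : Int) : Prop := out = decodingFibonacci_alt fib
instance (fib : String) (out : Int) : Decidable (Spec_decodingFibonacci fib out) := by unfold Spec_decodingFibonacci; infer_instance

-- ===== CLAIM (what is proved, stated in full; the proofs are below) =====
def Claim_equal_decodingFibonacci : Prop := ∀ (fib : String), Dom_decodingFibonacci fib → Spec_decodingFibonacci fib (decodingFibonacci fib)

-- ===== LEMMAS AND PROOFS =====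

-- sum of fibonacciNum (i+k+2) over the '1'-positions i of L
def sumF : List Char → Nat → Int
  | [], _ => 0
  | c :: r, k => (if c = '1' then fibonacciNum (k + 2) else 0) + sumF r (k + 1)

-- A's pair list, with the Fibonacci index shifted by k
def valList (L : List Char) (k : Nat) : List (Char × Int) :=
  (List.range L.length).map (fun i => (L.getD i ' ', fibonacciNum (i + k + 2)))

lemma valList_cons (c : Char) (r : List Char) (k : Nat) :
    valList (c :: r) k = (c, fibonacciNum (k + 2)) :: valList r (k + 1) := by
  simp [valList, List.range_succ_eq_map, List.map_map, Function.comp]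
  intro a _
  congr 1
  omega

lemma foldl_valList (L : List Char) (k : Nat) (num : Int) :
    (valList L k).foldl
      (fun num p => if p.1 = '1' then num + p.2 else num) num = num + sumF L k := by
  induction L generalizing k num with
  | nil => simp [valList, sumF]
  | cons c r ih =>
      rw [valList_cons]
      simp only [List.foldl_cons, sumF, ih]
      split_ifs <;> ring

lemma goFib_eq (L : List Char) (k : Nat) (num : Int) :
    goFib L num (fibonacciNum (k + 2)) (fibonacciNum (k + 3)) = num + sumF L k := by
  induction L generalizing k num with
  | nil => simp [goFib, sumF]
  | cons c r ih =>
      have hfib : fibonacciNum (k + 2) + fibonacciNum (k + 3) = fibonacciNum (k + 4) := by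
        have h : fibonacciNum (k + 4) = fibonacciNum (k + 3) + fibonacciNum (k + 2) := rfl
        omega
      show goFib r (if c = '1' then num + fibonacciNum (k + 2) else num)
            (fibonacciNum (k + 3)) (fibonacciNum (k + 2) + fibonacciNum (k + 3)) = _
      rw [hfib, show k + 3 = k + 1 + 2 from rfl, show k + 4 = k + 1 + 3 from rfl,
          ih (k + 1), sumF]
      split_ifs <;> ring

lemma slice_pred (L : List Char) :
    PySem.List.slice L none (some ((L.length : Int) - 1)) = L.dropLast := by
  cases L with
  | nil => simp [PySem.List.slice]
  | cons c r =>
      have h : ((c :: r).length : Int) - 1 = ((r.length : Nat) : Int) := by simp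
      rw [h, PySem.List.slice_to_natCast]
      simp [List.dropLast_eq_take]

lemma decodingFibonacci_eq_sumF (fib : String) :
    decodingFibonacci fib = sumF fib.toList.dropLast 0 := by
  simp only [decodingFibonacci, slice_pred]
  set L := fib.toList.dropLast with hL
  have hval : (PySem.List.pyRange 0 (L.length : Int) 1).foldl
      (fun acc i => acc ++ [(PySem.List.pyGetD L i ' ', fibonacciNum (i.toNat + 2))]) []
      = valList L 0 := by
    rw [PySem.List.foldl_append_singleton_eq_map]
    rw [PySem.List.pyRange_zero_nat, List.map_map]
    unfold valList
    apply List.map_congr_left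
    intro i hi
    simp [Function.comp, PySem.List.pyGetD_natCast]
  rw [hval]
  rw [PySem.List.foldl_pyRange_zero_pyGetD' (valList L 0) (' ', 0)
      (fun num p => if p.1 = '1' then num + p.2 else num) 0]
  rw [foldl_valList]
  ring

lemma alt_eq_sumF (fib : String) :
    decodingFibonacci_alt fib = sumF fib.toList.dropLast 0 := by
  unfold decodingFibonacci_alt
  rw [PySem.List.slice_to_neg_one]
  have : goFib fib.toList.dropLast 0 (fibonacciNum 2) (fibonacciNum 3) = 0 + sumF fib.toList.dropLast 0 :=
    goFib_eq _ 0 0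
  simpa [fibonacciNum] using this

-- ===== VERDICT (by name: the statement is the Claim_ definition above) =====
theorem decodingFibonacci_spec : Claim_equal_decodingFibonacci := by
  intro fib _
  unfold Spec_decodingFibonacci
  rw [decodingFibonacci_eq_sumF, alt_eq_sumF]
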